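-- pv_equiv track=rewrite | github.com/donovan-h-parks/UniteM | unitem/bin_tools.py | _binning_stats
-- ===== SOURCE A (Python) =====
-- def _binning_stats(bins, seq_lens):
--     """Calculate binning stats for a set of bins."""
--
--     total_uniq_binned_seqs = 0
--     tota_uniq_binned_bases = 0
--
--     bin_stats = {}
--     processed_seqs = set()
--     repeats = set()
--     for bin_id, seqs in bins.items():
--         num_binned_bases = 0
--         for seq_id in seqs:
--             num_binned_bases += seq_lens[seq_id]
--             if seq_id not in processed_seqs:
--                 processed_seqs.add(seq_id)
--                 tota_uniq_binned_bases += seq_lens[seq_id]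
--                 total_uniq_binned_seqs += 1
--             else:
--                 repeats.add(seq_id)
--
--         bin_stats[bin_id] = [len(seqs), num_binned_bases]
--
--     return bin_stats, total_uniq_binned_seqs, tota_uniq_binned_bases, len(repeats)
-- ===== SOURCE B (Python) =====
-- def _binning_stats(bins, seq_lens):
--     """Calculate binning stats for a set of bins."""
--     bin_stats = {bin_id: [len(seqs), sum(seq_lens[s] for s in seqs)]
--                  for bin_id, seqs in bins.items()}
--
--     counts = {}
--     for seqs in bins.values():
--         for seq_id in seqs:
--             counts[seq_id] = counts.get(seq_id, 0) + 1
--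
--     total_uniq_binned_seqs = len(counts)
--     tota_uniq_binned_bases = sum(seq_lens[s] for s in counts)
--     num_repeats = sum(1 for c in counts.values() if c > 1)
--
--     return bin_stats, total_uniq_binned_seqs, tota_uniq_binned_bases, num_repeats
-- ===== Notes on version B (the rewrite author's own statement) =====
-- stated objective: alternative
-- what changed: A's single fused nested pass that simultaneously maintains running unique/repeat sets, running totals and per-bin counts is replaced by a per-bin dict comprehension for bin_stats plus one frequency table over all binned seq_ids, from which the unique-sequence count, unique-base total and repeat count are read off as three separate reductions.
import Mathlib
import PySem

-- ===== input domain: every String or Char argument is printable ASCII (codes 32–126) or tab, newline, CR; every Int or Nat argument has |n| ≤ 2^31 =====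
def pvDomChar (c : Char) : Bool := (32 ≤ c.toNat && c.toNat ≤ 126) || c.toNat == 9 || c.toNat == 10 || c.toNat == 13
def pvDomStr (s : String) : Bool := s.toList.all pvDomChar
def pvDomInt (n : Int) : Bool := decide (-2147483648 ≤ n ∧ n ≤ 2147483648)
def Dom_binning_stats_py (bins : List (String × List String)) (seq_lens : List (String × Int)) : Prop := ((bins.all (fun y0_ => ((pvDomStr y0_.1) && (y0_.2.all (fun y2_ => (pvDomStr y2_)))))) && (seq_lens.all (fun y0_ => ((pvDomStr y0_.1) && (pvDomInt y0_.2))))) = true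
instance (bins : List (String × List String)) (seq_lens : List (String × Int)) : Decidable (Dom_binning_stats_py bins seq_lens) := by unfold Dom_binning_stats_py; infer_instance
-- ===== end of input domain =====

-- B replaces A's fused nested pass (two running sets + running totals) by a per-bin dict
-- comprehension plus one frequency table over all sequence ids, from which the unique/repeat
-- totals are read off as separate reductions (objective: alternative decomposition, same cost).

-- ===== PORT A =====
def binning_stats_py (bins : List (String × List String)) (seq_lens : List (String × Int)) : (List (String × List Int)) × Int × Int × Int :=
  let sl := PySem.Dict.mk seq_lens
  let fin := bins.foldl
    (fun (st : PySem.Dict String (List Int) × Int × Int × PySem.Set String × PySem.Set String) p =>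
      let inner := p.2.foldl
        (fun (s : Int × Int × Int × PySem.Set String × PySem.Set String) q =>
          let nbb := s.1 + sl.getD q 0
          if !(PySem.Set.contains s.2.2.2.1 q) then
            (nbb, s.2.1 + 1, s.2.2.1 + sl.getD q 0, PySem.Set.add s.2.2.2.1 q, s.2.2.2.2)
          else
            (nbb, s.2.1, s.2.2.1, s.2.2.2.1, PySem.Set.add s.2.2.2.2 q))
        (0, st.2.1, st.2.2.1, st.2.2.2.1, st.2.2.2.2)
      (PySem.Dict.insert st.1 p.1 [(p.2.length : Int), inner.1],
       inner.2.1, inner.2.2.1, inner.2.2.2.1, inner.2.2.2.2))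
    (PySem.Dict.empty, 0, 0, PySem.Set.empty, PySem.Set.empty)
  (fin.1.items, fin.2.1, fin.2.2.1, (PySem.Set.len fin.2.2.2.2 : Int))


-- ===== PORT B =====
def binning_stats_py_alt (bins : List (String × List String)) (seq_lens : List (String × Int)) : (List (String × List Int)) × Int × Int × Int :=
  let sl := PySem.Dict.mk seq_lens
  let bin_stats := bins.foldl
    (fun (d : PySem.Dict String (List Int)) p =>
      d.insert p.1 [(p.2.length : Int), (p.2.map (fun s => sl.getD s 0)).sum])
    PySem.Dict.empty
  let counts := bins.foldl
    (fun (c : PySem.Dict String Int) p =>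
      p.2.foldl (fun c q => c.insert q (c.getD q 0 + 1)) c)
    PySem.Dict.empty
  (bin_stats.items,
   (counts.size : Int),
   (counts.keys.map (fun s => sl.getD s 0)).sum,
   ((counts.values.countP (fun c => decide (1 < c))) : Int))

-- ===== PRECONDITION & SPEC =====
-- Pre_ excludes exactly the inputs on which the Python A raises KeyError: some seq_id of a bin
-- is missing from seq_lens (B raises there too).
def Pre_binning_stats_py (bins : List (String × List String)) (seq_lens : List (String × Int)) : Prop :=
  ∀ p ∈ bins, ∀ q ∈ p.2, q ∈ seq_lens.map Prod.fst
instance (bins : List (String × List String)) (seq_lens : List (String × Int)) : Decidable (Pre_binning_stats_py bins seq_lens) := by unfold Pre_binning_stats_py; infer_instance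
def pvWitness_binning_stats_py : (List (String × List String)) × (List (String × Int)) :=
  ([("b1", ["s1", "s2"]), ("b2", ["s2", "s3", "s3"])], [("s1", 10), ("s2", 5), ("s3", 7)])

def Spec_binning_stats_py (bins : List (String × List String)) (seq_lens : List (String × Int)) (out : (List (String × List Int)) × Int × Int × Int) : Prop := out = binning_stats_py_alt bins seq_lens
instance (bins : List (String × List String)) (seq_lens : List (String × Int)) (out : (List (String × List Int)) × Int × Int × Int) : Decidable (Spec_binning_stats_py bins seq_lens out) := by unfold Spec_binning_stats_py; infer_instance

-- ===== CLAIM (what is proved, stated in full; the proofs are below) =====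
def Claim_equal_binning_stats_py : Prop := ∀ (bins : List (String × List String)) (seq_lens : List (String × Int)), Dom_binning_stats_py bins seq_lens → Pre_binning_stats_py bins seq_lens → Spec_binning_stats_py bins seq_lens (binning_stats_py bins seq_lens)

-- ===== LEMMAS AND PROOFS =====
def stepA (sl : PySem.Dict String Int) (st : Int × Int × PySem.Set String × PySem.Set String) (q : String) : Int × Int × PySem.Set String × PySem.Set String :=
  if !(PySem.Set.contains st.2.2.1 q) then
    (st.1 + 1, st.2.1 + sl.getD q 0, PySem.Set.add st.2.2.1 q, st.2.2.2)
  else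
    (st.1, st.2.1, st.2.2.1, PySem.Set.add st.2.2.2 q)
def stepB (c : PySem.Dict String Int) (q : String) : PySem.Dict String Int :=
  c.insert q (c.getD q 0 + 1)

theorem innerA_split (sl : PySem.Dict String Int) (l : List String) (n : Int) (st : Int × Int × PySem.Set String × PySem.Set String) :
    l.foldl
      (fun (s : Int × Int × Int × PySem.Set String × PySem.Set String) q =>
        let nbb := s.1 + sl.getD q 0
        if !(PySem.Set.contains s.2.2.2.1 q) then
          (nbb, s.2.1 + 1, s.2.2.1 + sl.getD q 0, PySem.Set.add s.2.2.2.1 q, s.2.2.2.2)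
        else
          (nbb, s.2.1, s.2.2.1, s.2.2.2.1, PySem.Set.add s.2.2.2.2 q))
      (n, st)
    = (n + (l.map (fun s => sl.getD s 0)).sum, l.foldl (stepA sl) st) := by
  induction l generalizing n st with
  | nil => simp
  | cons q l ih =>
    rw [List.foldl_cons]
    have h : (let nbb := (n, st).1 + sl.getD q 0;
        if (!PySem.Set.contains (n, st).2.2.2.1 q) = true then
          (nbb, (n, st).2.1 + 1, (n, st).2.2.1 + sl.getD q 0, PySem.Set.add (n, st).2.2.2.1 q, (n, st).2.2.2.2)
        else (nbb, (n, st).2.1, (n, st).2.2.1, (n, st).2.2.2.1, PySem.Set.add (n, st).2.2.2.2 q))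
        = ((n + sl.getD q 0, stepA sl st q) : Int × Int × Int × PySem.Set String × PySem.Set String) := by
      simp only [stepA]; split <;> rfl
    rw [h, ih]
    simp
    ring
theorem countsB_flat (bins : List (String × List String)) (c : PySem.Dict String Int) :
    bins.foldl (fun (c : PySem.Dict String Int) p => p.2.foldl (fun c q => c.insert q (c.getD q 0 + 1)) c) c
    = (bins.flatMap Prod.snd).foldl stepB c := by
  induction bins generalizing c with
  | nil => simp
  | cons p bins ih =>
    rw [List.foldl_cons, List.flatMap_cons, List.foldl_append, ih]
    rfl
theorem outerA_split (sl : PySem.Dict String Int) (bins : List (String × List String)) (d : PySem.Dict String (List Int)) (st : Int × Int × PySem.Set String × PySem.Set String) :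
    bins.foldl
      (fun (st : PySem.Dict String (List Int) × Int × Int × PySem.Set String × PySem.Set String) p =>
        let inner := p.2.foldl
          (fun (s : Int × Int × Int × PySem.Set String × PySem.Set String) q =>
            let nbb := s.1 + sl.getD q 0
            if !(PySem.Set.contains s.2.2.2.1 q) then
              (nbb, s.2.1 + 1, s.2.2.1 + sl.getD q 0, PySem.Set.add s.2.2.2.1 q, s.2.2.2.2)
            else
              (nbb, s.2.1, s.2.2.1, s.2.2.2.1, PySem.Set.add s.2.2.2.2 q))
          (0, st.2.1, st.2.2.1, st.2.2.2.1, st.2.2.2.2)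
        (PySem.Dict.insert st.1 p.1 [(p.2.length : Int), inner.1],
         inner.2.1, inner.2.2.1, inner.2.2.2.1, inner.2.2.2.2))
      (d, st)
    = (bins.foldl (fun d p => d.insert p.1 [(p.2.length : Int), (p.2.map (fun s => sl.getD s 0)).sum]) d,
       (bins.flatMap Prod.snd).foldl (stepA sl) st) := by
  induction bins generalizing d st with
  | nil => simp
  | cons p bins ih =>
    rw [List.foldl_cons, innerA_split]
    simp only [zero_add]
    rw [List.flatMap_cons, List.foldl_append]
    exact ih _ _


structure ABRel (sl : PySem.Dict String Int) (st : Int × Int × PySem.Set String × PySem.Set String) (c : PySem.Dict String Int) : Prop where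
  keys : st.2.2.1 = c.keys
  nodup : c.keys.Nodup
  pos : ∀ kv ∈ c.items, 1 ≤ kv.2
  uniq : st.1 = (c.size : Int)
  bases : st.2.1 = (c.keys.map (fun s => sl.getD s 0)).sum
  reps_mem : ∀ x, x ∈ st.2.2.2 ↔ ∃ kv ∈ c.items, kv.1 = x ∧ 1 < kv.2
  reps_nodup : st.2.2.2.Nodup

theorem abrel_init (sl : PySem.Dict String Int) : ABRel sl (0, 0, PySem.Set.empty, PySem.Set.empty) PySem.Dict.empty := by
  constructor <;> simp [PySem.Set.empty, PySem.Dict.empty, PySem.Dict.keys, PySem.Dict.size]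

theorem abrel_step (sl : PySem.Dict String Int) (st : Int × Int × PySem.Set String × PySem.Set String) (c : PySem.Dict String Int) (q : String) (h : ABRel sl st c) : ABRel sl (stepA sl st q) (stepB c q) := by
  obtain ⟨u, b, proc, reps⟩ := st
  obtain ⟨hk, hn, hp, hu, hb, hm, hrn⟩ := h
  simp only at hk hu hb hm hrn
  by_cases hq : c.contains q = true
  · -- q already counted: A adds q to repeats, B bumps the count past 1
    have hmemk : q ∈ c.keys := (PySem.Dict.contains_iff_mem_keys c q).mp hq
    have hcontains : PySem.Set.contains proc q = true := by
      rw [hk]; exact (PySem.Set.contains_iff c.keys q).mpr hmemk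
    obtain ⟨v, hv⟩ : ∃ v, c.get? q = some v := by
      have := PySem.Dict.contains_eq_isSome_get? (d := c) (k := q)
      rw [hq] at this; exact Option.isSome_iff_exists.mp this.symm
    have hgetD : c.getD q 0 = v := PySem.Dict.getD_of_get?_eq_some c 0 hv
    have hvmem : (q, v) ∈ c.items := PySem.Dict.mem_items_of_get?_eq_some c hv
    have hv1 : 1 ≤ v := hp _ hvmem
    have hitems : (c.insert q (v + 1)).items
        = c.items.map (fun p => if p.1 == q then (q, v + 1) else p) :=
      PySem.Dict.items_insert_of_contains c (v + 1) hq
    have hkeys : (c.insert q (v + 1)).keys = c.keys := PySem.Dict.keys_insert_of_contains c (v + 1) hq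
    simp only [stepA, stepB, hcontains, Bool.not_true, hgetD]
    rw [if_neg (by simp)]
    constructor
    · simpa [hkeys] using hk
    · simpa [hkeys] using hn
    · intro kv hkv
      rw [hitems] at hkv
      obtain ⟨kv0, hkv0, hmap⟩ := List.mem_map.mp hkv
      by_cases h1 : kv0.1 == q
      · rw [if_pos h1] at hmap; rw [← hmap]; simp; omega
      · rw [if_neg h1] at hmap; exact hmap ▸ hp _ hkv0
    · simpa [PySem.Dict.size, hitems] using hu
    · simpa [hkeys] using hb
    · intro x
      rw [PySem.Set.mem_add reps q x, hitems]
      constructor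
      · rintro (hx | hxq)
        · obtain ⟨kv, hkv, hx1, hlt⟩ := (hm x).mp hx
          refine ⟨(fun p => if p.1 == q then (q, v + 1) else p) kv, List.mem_map_of_mem hkv, ?_, ?_⟩
          · by_cases h1 : kv.1 == q
            · simp only [if_pos h1]; simpa using (by simpa using h1 : kv.1 = q) ▸ hx1
            · simp only [if_neg h1]; exact hx1
          · by_cases h1 : kv.1 == q
            · simp only [if_pos h1]; omega
            · simp only [if_neg h1]; exact hlt
        · refine ⟨(q, v + 1), ?_, hxq.symm, by omega⟩
          refine List.mem_map.mpr ⟨(q, v), hvmem, ?_⟩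
          simp
      · rintro ⟨kv1, hkv1, hx1, hlt1⟩
        obtain ⟨kv0, hkv0, hmap⟩ := List.mem_map.mp hkv1
        by_cases h1 : kv0.1 == q
        · rw [if_pos h1] at hmap
          right; rw [← hx1, ← hmap]
        · rw [if_neg h1] at hmap
          left; exact (hm x).mpr ⟨kv0, hkv0, hmap ▸ hx1, hmap ▸ hlt1⟩
    · exact PySem.Set.nodup_add reps q hrn
  · -- fresh sequence id: A counts it as unique, B records count 1
    have hqf : c.contains q = false := by simpa using hq
    have hnm : q ∉ c.keys := fun hx => hq ((PySem.Dict.contains_iff_mem_keys c q).mpr hx)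
    have hcontains : PySem.Set.contains proc q = false := by
      rw [hk]
      exact Bool.eq_false_iff.mpr (fun hx => hnm ((PySem.Set.contains_iff c.keys q).mp hx))
    have hgetD : c.getD q 0 = 0 := PySem.Dict.getD_of_not_contains c 0 hqf
    have hitems : (c.insert q (0 + 1)).items = c.items ++ [(q, 0 + 1)] :=
      PySem.Dict.items_insert_of_not_contains c (0 + 1) hqf
    have hkeys : (c.insert q (0 + 1)).keys = c.keys ++ [q] :=
      PySem.Dict.keys_insert_of_not_contains c (0 + 1) hqf
    have haddp : PySem.Set.add proc q = proc ++ [q] := by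
      simp only [PySem.Set.add, hcontains]
      simp
    simp only [stepA, stepB, hcontains, Bool.not_false, if_true, hgetD]
    constructor
    · rw [hk] at haddp
      simp only [hkeys, hk, haddp]
    · rw [hkeys]
      have := PySem.Dict.nodup_keys_insert c q (0 + 1) hn
      rwa [hkeys] at this
    · intro kv hkv
      rw [hitems] at hkv
      rcases List.mem_append.mp hkv with h1 | h1
      · exact hp _ h1
      · simp only [List.mem_singleton] at h1; rw [h1]; norm_num
    · have hitems' : (c.insert q 1).items = c.items ++ [(q, 1)] := by simpa using hitems
      have hsz : (c.insert q (0 + 1)).size = c.size + 1 := by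
        simp [PySem.Dict.size, hitems']
      rw [hsz, hu]; push_cast; ring
    · rw [hkeys, hb]; simp
    · intro x
      rw [hm x, hitems]
      constructor
      · rintro ⟨kv, hkv, hx, hlt⟩; exact ⟨kv, by simp [hkv], hx, hlt⟩
      · rintro ⟨kv, hkv, hx, hlt⟩
        rcases List.mem_append.mp hkv with h1 | h1
        · exact ⟨kv, h1, hx, hlt⟩
        · simp only [List.mem_singleton] at h1; rw [h1] at hlt; norm_num at hlt
    · exact hrn

theorem abrel_foldl (sl : PySem.Dict String Int) (l : List String) (st : Int × Int × PySem.Set String × PySem.Set String) (c : PySem.Dict String Int) (h : ABRel sl st c) : ABRel sl (l.foldl (stepA sl) st) (l.foldl stepB c) := by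
  induction l generalizing st c with
  | nil => exact h
  | cons q l ih => exact ih _ _ (abrel_step sl st c q h)

theorem repeats_count (sl : PySem.Dict String Int) (l : List String) :
    (((l.foldl (stepA sl) (0, 0, PySem.Set.empty, PySem.Set.empty)).2.2.2.length : Int))
    = (((l.foldl stepB PySem.Dict.empty).values.countP (fun v => decide (1 < v))) : Int) := by
  have hrel := abrel_foldl sl l (0, 0, PySem.Set.empty, PySem.Set.empty) PySem.Dict.empty (abrel_init sl)
  set c := l.foldl stepB PySem.Dict.empty with hc
  set reps := (l.foldl (stepA sl) (0, 0, PySem.Set.empty, PySem.Set.empty)).2.2.2 with hreps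
  have hnd0 : (c.items.map (fun kv => kv.1)).Nodup := by
    have := hrel.nodup
    simpa [PySem.Dict.keys] using this
  have hnd : ((c.items.filter (fun kv => decide (1 < kv.2))).map (fun kv => kv.1)).Nodup := by
    have hsub : ((c.items.filter (fun kv => decide (1 < kv.2))).map (fun kv => kv.1)).Sublist (c.items.map (fun kv => kv.1)) :=
      List.Sublist.map _ List.filter_sublist
    exact hnd0.sublist hsub
  have hperm : reps.Perm ((c.items.filter (fun kv => decide (1 < kv.2))).map (fun kv => kv.1)) := by
    refine (List.perm_ext_iff_of_nodup hrel.reps_nodup hnd).mpr ?_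
    intro x
    rw [hrel.reps_mem x]
    simp only [List.mem_map, List.mem_filter]
    constructor
    · rintro ⟨kv, hkv, hx, hlt⟩
      exact ⟨kv, ⟨hkv, by simpa using hlt⟩, hx⟩
    · rintro ⟨kv, ⟨hkv, hlt⟩, hx⟩
      exact ⟨kv, hkv, hx, by simpa using hlt⟩
  have hlen : reps.length = (c.items.filter (fun kv => decide (1 < kv.2))).length := by
    rw [hperm.length_eq, List.length_map]
  have hcount : c.values.countP (fun v => decide (1 < v)) = (c.items.filter (fun kv => decide (1 < kv.2))).length := by
    have : c.values = c.items.map (fun kv => kv.2) := rfl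
    rw [this, List.countP_map, List.countP_eq_length_filter]
    rfl
  rw [hlen, hcount]

theorem main_eq (bins : List (String × List String)) (seq_lens : List (String × Int)) :
    binning_stats_py bins seq_lens = binning_stats_py_alt bins seq_lens := by
  unfold binning_stats_py binning_stats_py_alt
  dsimp only
  rw [outerA_split, countsB_flat]
  have hrel := abrel_foldl (PySem.Dict.mk seq_lens) (bins.flatMap Prod.snd)
      (0, 0, PySem.Set.empty, PySem.Set.empty) PySem.Dict.empty (abrel_init _)
  refine Prod.ext rfl (Prod.ext ?_ (Prod.ext ?_ ?_))
  · exact hrel.uniq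
  · exact hrel.bases
  · exact repeats_count (PySem.Dict.mk seq_lens) (bins.flatMap Prod.snd)


-- ===== VERDICT (by name: the statement is the Claim_ definition above) =====
theorem binning_stats_py_spec : Claim_equal_binning_stats_py := by
  intro bins seq_lens _ _
  show binning_stats_py bins seq_lens = binning_stats_py_alt bins seq_lens
  exact main_eq bins seq_lens
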